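-- pv_equiv track=rewrite | github.com/vl3c/DuneDog | src/dunedog/chaos/phonetics.py | analyze_phonetic_mood
-- ===== SOURCE A (Python) =====
-- VOWELS = set("aeiou")
--
-- SOFT_CONSONANTS = set("lmnrwy")  # dreamy
--
-- HARD_CONSONANTS = set("kptdbg")  # urgent
--
-- SIBILANTS = set("szfv")  # secretive
--
-- def analyze_phonetic_mood(text: str) -> str:
--     """Analyse the phonetic character of text.
--
--     Returns one of:
--       'dreamy'     — soft consonants dominate
--       'urgent'     — hard consonants dominate
--       'secretive'  — sibilants dominate
--       'flowing'    — vowel-heavy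
--       'balanced'   — mixed
--     """
--     if not text:
--         return "balanced"
--
--     t = text.lower()
--     alpha = [c for c in t if c.isalpha()]
--     if not alpha:
--         return "balanced"
--
--     vowel_count = sum(1 for c in alpha if c in VOWELS)
--     soft_count = sum(1 for c in alpha if c in SOFT_CONSONANTS)
--     hard_count = sum(1 for c in alpha if c in HARD_CONSONANTS)
--     sib_count = sum(1 for c in alpha if c in SIBILANTS)
--
--     n = len(alpha)
--     vowel_ratio = vowel_count / n
--
--     # If vowels dominate (>55%), it's flowing
--     if vowel_ratio > 0.55:
--         return "flowing"
--
--     consonant_counts = {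
--         "dreamy": soft_count,
--         "urgent": hard_count,
--         "secretive": sib_count,
--     }
--     top_mood = max(consonant_counts, key=consonant_counts.get)  # type: ignore[arg-type]
--     top_count = consonant_counts[top_mood]
--
--     # Need at least 30% of consonants to be in a single category to be dominant
--     consonant_total = n - vowel_count
--     if consonant_total == 0:
--         return "flowing"
--
--     if top_count / consonant_total >= 0.40:
--         return top_mood
--
--     return "balanced"
-- ===== SOURCE B (Python) =====
-- _CATEGORIES = ("aeiou", "lmnrwy", "kptdbg", "szfv")
-- _MOODS = ("dreamy", "urgent", "secretive")
--
-- def _category(c):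
--     """Index of c's phonetic category (4 = other consonant)."""
--     for i, letters in enumerate(_CATEGORIES):
--         if c in letters:
--             return i
--     return 4
--
-- def analyze_phonetic_mood(text: str) -> str:
--     """Single fused pass: classify each letter once into one of five category
--     slots of a count vector, then decide with exact integer arithmetic and an
--     argmax over slot indices."""
--     counts = [0, 0, 0, 0, 0]
--     for c in text:
--         lc = c.lower()
--         if lc.isalpha():
--             counts[_category(lc)] += 1
--     n = sum(counts)
--     if n == 0:
--         return "balanced"
--     v = counts[0]
--     if 20 * v > 11 * n:  # vowel fraction exceeds 0.55
--         return "flowing"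
--     best = max(range(1, 4), key=lambda i: counts[i])
--     if 5 * counts[best] >= 2 * (n - v):  # winner holds at least 0.40 of the consonants
--         return _MOODS[best - 1]
--     return "balanced"
-- ===== Notes on version B (the rewrite author's own statement) =====
-- stated objective: alternative
-- what changed: B replaces A's filtered letter list, four separate per-category scans and max(dict, key=dict.get) by one fused pass that classifies each character once (a category classifier over an enumerated category table) into a five-slot count vector, then decides with exact integer comparisons and an argmax over slot indices.
import Mathlib
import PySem

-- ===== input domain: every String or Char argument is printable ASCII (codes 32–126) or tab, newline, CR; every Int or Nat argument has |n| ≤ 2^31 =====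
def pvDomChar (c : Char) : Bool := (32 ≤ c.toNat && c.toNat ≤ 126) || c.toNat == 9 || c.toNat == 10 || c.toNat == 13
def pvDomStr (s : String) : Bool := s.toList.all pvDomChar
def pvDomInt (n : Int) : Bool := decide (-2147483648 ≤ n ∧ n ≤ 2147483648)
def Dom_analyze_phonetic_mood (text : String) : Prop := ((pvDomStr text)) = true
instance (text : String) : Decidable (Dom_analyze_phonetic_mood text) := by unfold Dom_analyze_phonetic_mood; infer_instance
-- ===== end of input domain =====

-- B replaces A's filtered letter list, four category scans and dict-keyed max by one fused
-- pass that classifies each letter once into a five-slot count vector and an argmax over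
-- slot indices; same return value.

-- ===== PORT A =====
-- A's module constants are sets used only for membership tests: ported as their element lists.
def pvVOWELS : List Char := ['a', 'e', 'i', 'o', 'u']
def pvSOFT : List Char := ['l', 'm', 'n', 'r', 'w', 'y']   -- dreamy
def pvHARD : List Char := ['k', 'p', 't', 'd', 'b', 'g']   -- urgent
def pvSIB : List Char := ['s', 'z', 'f', 'v']      -- secretive

-- Literal port of A.  The float tests 'vowel_count / n > 0.55' and
-- 'top_count / consonant_total >= 0.40' are ported as the exact rational comparisons
-- 20*v > 11*n and 5*t ≥ 2*c, which agree with CPython's float comparison for every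
-- count reachable from a real string (denominators far below 2^52).
-- 'max(dict, key=dict.get)' (first key with maximal value) is PySem.List.max? over the
-- keys in insertion order; '.getD "balanced"' only totalises the Option (keys ≠ []).
def analyze_phonetic_mood (text : String) : String :=
  if text.toList = [] then "balanced"
  else
    let t := PySem.Chars.lower text.toList
    let alpha := t.filter (fun c => PySem.Chars.isalpha c)
    if alpha = [] then "balanced"
    else
      let vowel_count : Int := (alpha.countP (fun c => pvVOWELS.contains c) : Int)
      let soft_count : Int := (alpha.countP (fun c => pvSOFT.contains c) : Int)
      let hard_count : Int := (alpha.countP (fun c => pvHARD.contains c) : Int)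
      let sib_count : Int := (alpha.countP (fun c => pvSIB.contains c) : Int)
      let n : Int := (alpha.length : Int)
      if 20 * vowel_count > 11 * n then "flowing"
      else
        let consonant_counts : PySem.Dict String Int :=
          ((PySem.Dict.empty.insert "dreamy" soft_count).insert "urgent" hard_count).insert "secretive" sib_count
        let top_mood : String :=
          (PySem.List.max? consonant_counts.keys (fun k => consonant_counts.getD k 0)).getD "balanced"
        let top_count : Int := consonant_counts.getD top_mood 0
        let consonant_total : Int := n - vowel_count
        if consonant_total = 0 then "flowing"
        else if 5 * top_count ≥ 2 * consonant_total then top_mood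
        else "balanced"

-- ===== PORT B =====
-- Literal port of B (Source B): _category is the 'for … return' loop as find? over the
-- enumerated category tuple; the main loop is one fold over the characters updating a
-- five-slot count vector; max(range(1,4), key=…) is PySem.List.max? over the range
-- (.getD 0 only totalises the Option — range(1,4) is never empty).
def pvCATEGORIES : List (List Char) :=
  [['a', 'e', 'i', 'o', 'u'], ['l', 'm', 'n', 'r', 'w', 'y'], ['k', 'p', 't', 'd', 'b', 'g'], ['s', 'z', 'f', 'v']]
def pvMOODS : List String := ["dreamy", "urgent", "secretive"]

def pvCategory (c : Char) : Int :=
  match (PySem.List.enumerate pvCATEGORIES 0).find? (fun p => p.2.contains c) with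
  | some p => p.1
  | none => 4

def analyze_phonetic_mood_alt (text : String) : String :=
  let counts : List Int :=
    text.toList.foldl (fun cs c =>
      if PySem.Chars.isalpha (PySem.Chars.lowerChar c) then
        PySem.List.pySetD cs (pvCategory (PySem.Chars.lowerChar c))
          (PySem.List.pyGetD cs (pvCategory (PySem.Chars.lowerChar c)) 0 + 1)
      else cs) [0, 0, 0, 0, 0]
  let n : Int := counts.sum
  if n = 0 then "balanced"
  else
    let v : Int := PySem.List.pyGetD counts 0 0
    if 20 * v > 11 * n then "flowing"
    else
      let best : Int := (PySem.List.max? (PySem.List.pyRange 1 4 1) (fun i => PySem.List.pyGetD counts i 0)).getD 0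
      if 5 * PySem.List.pyGetD counts best 0 ≥ 2 * (n - v) then PySem.List.pyGetD pvMOODS (best - 1) ""
      else "balanced"

-- ===== PRECONDITION & SPEC =====
def Spec_analyze_phonetic_mood (text : String) (out : String) : Prop := out = analyze_phonetic_mood_alt text
instance (text : String) (out : String) : Decidable (Spec_analyze_phonetic_mood text out) := by unfold Spec_analyze_phonetic_mood; infer_instance

-- ===== CLAIM (what is proved, stated in full; the proofs are below) =====
def Claim_equal_analyze_phonetic_mood : Prop := ∀ (text : String), Dom_analyze_phonetic_mood text → Spec_analyze_phonetic_mood text (analyze_phonetic_mood text)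

-- ===== LEMMAS AND PROOFS =====

-- _category is the membership if-chain over the four category alphabets.
lemma pv_cat_spec (c : Char) :
    pvCategory c
      = (if pvVOWELS.contains c then 0 else if pvSOFT.contains c then 1
         else if pvHARD.contains c then 2 else if pvSIB.contains c then 3 else 4) := by
  simp only [pvCategory, pvCATEGORIES, PySem.List.enumerate_cons, PySem.List.enumerate_nil,
    List.find?_cons, List.find?_nil]
  simp only [pvVOWELS, pvSOFT, pvHARD, pvSIB]
  split_ifs <;> simp_all

lemma pv_cat_nonneg (c : Char) : 0 ≤ pvCategory c := by
  rw [pv_cat_spec]; split_ifs <;> norm_num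

lemma pv_cat_lt (c : Char) : pvCategory c < 5 := by
  rw [pv_cat_spec]; split_ifs <;> norm_num

-- The count vector keeps length 5 through the loop, slot i holds the number of
-- characters whose lowered form is alphabetic of category i.
lemma pv_fold_counts (t : List Char) (cs : List Int) (h5 : cs.length = 5) :
    (t.foldl (fun cs c =>
        if PySem.Chars.isalpha (PySem.Chars.lowerChar c) then
          PySem.List.pySetD cs (pvCategory (PySem.Chars.lowerChar c))
            (PySem.List.pyGetD cs (pvCategory (PySem.Chars.lowerChar c)) 0 + 1)
        else cs) cs).length = 5
    ∧ ∀ i : Nat, i < 5 →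
      (t.foldl (fun cs c =>
        if PySem.Chars.isalpha (PySem.Chars.lowerChar c) then
          PySem.List.pySetD cs (pvCategory (PySem.Chars.lowerChar c))
            (PySem.List.pyGetD cs (pvCategory (PySem.Chars.lowerChar c)) 0 + 1)
        else cs) cs).getD i 0
      = cs.getD i 0 + (t.countP (fun c => PySem.Chars.isalpha (PySem.Chars.lowerChar c)
            && pvCategory (PySem.Chars.lowerChar c) == (i : Int)) : Int) := by
  induction t generalizing cs with
  | nil => exact ⟨h5, by simp⟩
  | cons a t ih =>
    simp only [List.foldl_cons]
    by_cases ha : PySem.Chars.isalpha (PySem.Chars.lowerChar a) = true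
    · have hj0 := pv_cat_nonneg (PySem.Chars.lowerChar a)
      have hj5 := pv_cat_lt (PySem.Chars.lowerChar a)
      have hset : PySem.List.pySetD cs (pvCategory (PySem.Chars.lowerChar a))
          (PySem.List.pyGetD cs (pvCategory (PySem.Chars.lowerChar a)) 0 + 1)
          = cs.set (pvCategory (PySem.Chars.lowerChar a)).toNat
              (PySem.List.pyGetD cs (pvCategory (PySem.Chars.lowerChar a)) 0 + 1) :=
        PySem.List.pySetD_of_nonneg _ _ hj0
      have hlen : (cs.set (pvCategory (PySem.Chars.lowerChar a)).toNat
          (PySem.List.pyGetD cs (pvCategory (PySem.Chars.lowerChar a)) 0 + 1)).length = 5 := by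
        simp [h5]
      obtain ⟨ihl, ihg⟩ := ih _ hlen
      refine ⟨by simpa [ha, hset] using ihl, ?_⟩
      intro i hi
      rw [if_pos ha, hset, ihg i hi]
      have hget : PySem.List.pyGetD cs (pvCategory (PySem.Chars.lowerChar a)) 0
          = cs.getD (pvCategory (PySem.Chars.lowerChar a)).toNat 0 := by
        rw [PySem.List.pyGetD_of_nonneg _ _ hj0]
      have hsetget : (cs.set (pvCategory (PySem.Chars.lowerChar a)).toNat
          (PySem.List.pyGetD cs (pvCategory (PySem.Chars.lowerChar a)) 0 + 1)).getD i 0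
          = if (pvCategory (PySem.Chars.lowerChar a)).toNat = i
            then cs.getD i 0 + 1 else cs.getD i 0 := by
        by_cases hij : (pvCategory (PySem.Chars.lowerChar a)).toNat = i
        · subst hij
          rw [if_pos rfl, hget, List.getD, List.getElem?_set_self (by omega)]
          rfl
        · rw [if_neg hij, List.getD, List.getElem?_set_ne (by omega), List.getD]
      rw [hsetget, List.countP_cons]
      have hcat : (PySem.Chars.isalpha (PySem.Chars.lowerChar a)
          && pvCategory (PySem.Chars.lowerChar a) == (i : Int))
          = decide ((pvCategory (PySem.Chars.lowerChar a)).toNat = i) := by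
        rw [ha, Bool.true_and, Bool.eq_iff_iff]
        simp only [beq_iff_eq, decide_eq_true_eq]
        omega
      rw [hcat]
      by_cases hij : (pvCategory (PySem.Chars.lowerChar a)).toNat = i <;>
        first
          | (simp [hij]; ring)
          | simp [hij]
    · obtain ⟨ihl, ihg⟩ := ih _ h5
      rw [if_neg ha]
      refine ⟨ihl, ?_⟩
      intro i hi
      rw [ihg i hi, List.countP_cons]
      simp [ha]

-- Membership in each category alphabet decides the category index (the four
-- alphabets are pairwise disjoint).
lemma pv_soft_not_vowel (c : Char) (h : c ∈ pvSOFT) : c ∉ pvVOWELS := by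
  fin_cases h <;> decide
lemma pv_hard_not_vowel (c : Char) (h : c ∈ pvHARD) : c ∉ pvVOWELS := by
  fin_cases h <;> decide
lemma pv_hard_not_soft (c : Char) (h : c ∈ pvHARD) : c ∉ pvSOFT := by
  fin_cases h <;> decide
lemma pv_sib_not_vowel (c : Char) (h : c ∈ pvSIB) : c ∉ pvVOWELS := by
  fin_cases h <;> decide
lemma pv_sib_not_soft (c : Char) (h : c ∈ pvSIB) : c ∉ pvSOFT := by
  fin_cases h <;> decide
lemma pv_sib_not_hard (c : Char) (h : c ∈ pvSIB) : c ∉ pvHARD := by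
  fin_cases h <;> decide

lemma pv_cat_eq_zero (c : Char) : (pvCategory c == 0) = pvVOWELS.contains c := by
  rw [pv_cat_spec]
  by_cases hv : c ∈ pvVOWELS
  · simp [List.contains_eq_mem, hv]
  · simp only [List.contains_eq_mem, hv, decide_false]
    split_ifs <;> simp_all

lemma pv_cat_eq_one (c : Char) : (pvCategory c == 1) = pvSOFT.contains c := by
  rw [pv_cat_spec]
  by_cases hs : c ∈ pvSOFT
  · have hv := pv_soft_not_vowel c hs
    simp [List.contains_eq_mem, hs, hv]
  · by_cases hv : c ∈ pvVOWELS
    · simp [List.contains_eq_mem, hs, hv]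
    · simp only [List.contains_eq_mem, hs, hv, decide_false]
      split_ifs <;> simp_all

lemma pv_cat_eq_two (c : Char) : (pvCategory c == 2) = pvHARD.contains c := by
  rw [pv_cat_spec]
  by_cases hh : c ∈ pvHARD
  · have hv := pv_hard_not_vowel c hh
    have hs := pv_hard_not_soft c hh
    simp [List.contains_eq_mem, hh, hv, hs]
  · by_cases hv : c ∈ pvVOWELS
    · simp [List.contains_eq_mem, hh, hv]
    · by_cases hs : c ∈ pvSOFT
      · simp [List.contains_eq_mem, hh, hv, hs]
      · simp only [List.contains_eq_mem, hh, hv, hs, decide_false]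
        split_ifs <;> simp_all

lemma pv_cat_eq_three (c : Char) : (pvCategory c == 3) = pvSIB.contains c := by
  rw [pv_cat_spec]
  by_cases hb : c ∈ pvSIB
  · have hv := pv_sib_not_vowel c hb
    have hs := pv_sib_not_soft c hb
    have hh := pv_sib_not_hard c hb
    simp [List.contains_eq_mem, hb, hv, hs, hh]
  · by_cases hv : c ∈ pvVOWELS
    · simp [List.contains_eq_mem, hb, hv]
    · by_cases hs : c ∈ pvSOFT
      · simp [List.contains_eq_mem, hb, hv, hs]
      · by_cases hh : c ∈ pvHARD
        · simp [List.contains_eq_mem, hb, hv, hs, hh]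
        · simp [List.contains_eq_mem, hb, hv, hs, hh]

-- The five slots partition the alphabetic characters.
lemma pv_cat_partition (L : List Char) :
    L.countP (fun c => pvCategory c == 0) + L.countP (fun c => pvCategory c == 1)
      + L.countP (fun c => pvCategory c == 2) + L.countP (fun c => pvCategory c == 3)
      + L.countP (fun c => pvCategory c == 4) = L.length := by
  induction L with
  | nil => simp
  | cons a L ih =>
    simp only [List.countP_cons, List.length_cons]
    have h0 := pv_cat_nonneg a
    have h5 := pv_cat_lt a
    have : pvCategory a = 0 ∨ pvCategory a = 1 ∨ pvCategory a = 2 ∨ pvCategory a = 3 ∨ pvCategory a = 4 := by omega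
    rcases this with h | h | h | h | h <;> simp [h] <;> omega

-- Per-slot counts over the fused single pass equal A's per-category counts over
-- the filtered lowered letter list.
lemma pv_slot_count (t : List Char) (i : Int) (f : Char → Bool)
    (hf : ∀ c, (pvCategory c == i) = f c) :
    (t.countP (fun c => PySem.Chars.isalpha (PySem.Chars.lowerChar c)
        && pvCategory (PySem.Chars.lowerChar c) == i) : Int)
      = (((PySem.Chars.lower t).filter (fun c => PySem.Chars.isalpha c)).countP f : Int) := by
  have h1 : PySem.Chars.lower t = t.map PySem.Chars.lowerChar := rfl
  rw [h1, List.countP_filter, List.countP_map]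
  congr 1
  apply List.countP_congr
  intro c _
  simp only [Function.comp]
  rw [← hf, Bool.and_comm]

-- A's max(dict, key=dict.get) over the three-key dict and B's argmax over the slot
-- indices select the same (mood, count) pair, first-wins on ties.
lemma pv_top_eq (v s h sb o : Int) :
    (((PySem.List.max?
        ((((PySem.Dict.empty.insert "dreamy" s).insert "urgent" h).insert "secretive" sb : PySem.Dict String Int)).keys
        (fun k => ((((PySem.Dict.empty.insert "dreamy" s).insert "urgent" h).insert "secretive" sb : PySem.Dict String Int)).getD k 0)).getD "balanced")
      = PySem.List.pyGetD pvMOODS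
          (((PySem.List.max? (PySem.List.pyRange 1 4 1) (fun i => PySem.List.pyGetD [v, s, h, sb, o] i 0)).getD 0) - 1) "")
    ∧ ((((PySem.Dict.empty.insert "dreamy" s).insert "urgent" h).insert "secretive" sb : PySem.Dict String Int)).getD
        ((PySem.List.max?
          ((((PySem.Dict.empty.insert "dreamy" s).insert "urgent" h).insert "secretive" sb : PySem.Dict String Int)).keys
          (fun k => ((((PySem.Dict.empty.insert "dreamy" s).insert "urgent" h).insert "secretive" sb : PySem.Dict String Int)).getD k 0)).getD "balanced") 0
      = PySem.List.pyGetD [v, s, h, sb, o]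
          ((PySem.List.max? (PySem.List.pyRange 1 4 1) (fun i => PySem.List.pyGetD [v, s, h, sb, o] i 0)).getD 0) 0 := by
  have hk : ((((PySem.Dict.empty.insert "dreamy" s).insert "urgent" h).insert "secretive" sb : PySem.Dict String Int)).keys
      = ["dreamy", "urgent", "secretive"] := by
    simp [PySem.Dict.insert, PySem.Dict.empty, PySem.Dict.keys]
  have hd : ((((PySem.Dict.empty.insert "dreamy" s).insert "urgent" h).insert "secretive" sb : PySem.Dict String Int)).getD "dreamy" 0 = s := by
    rw [PySem.Dict.getD_insert_of_ne _ _ _ (by decide), PySem.Dict.getD_insert_of_ne _ _ _ (by decide),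
      PySem.Dict.getD_insert_self]
  have hu : ((((PySem.Dict.empty.insert "dreamy" s).insert "urgent" h).insert "secretive" sb : PySem.Dict String Int)).getD "urgent" 0 = h := by
    rw [PySem.Dict.getD_insert_of_ne _ _ _ (by decide), PySem.Dict.getD_insert_self]
  have hs : ((((PySem.Dict.empty.insert "dreamy" s).insert "urgent" h).insert "secretive" sb : PySem.Dict String Int)).getD "secretive" 0 = sb := by
    rw [PySem.Dict.getD_insert_self]
  have hr : PySem.List.pyRange 1 4 1 = [1, 2, 3] := by decide
  refine ⟨?_, ?_⟩ <;>
    (rw [hk, hr]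
     by_cases c1 : s < h <;> by_cases c2 : h < sb <;> by_cases c3 : s < sb <;>
       simp [PySem.List.max?, c1, c2, c3, hd, hu, hs, pvMOODS, PySem.List.pyGetD])

-- ===== VERDICT (by name: the statement is the Claim_ definition above) =====
theorem analyze_phonetic_mood_spec : Claim_equal_analyze_phonetic_mood := by
  intro text _
  unfold Spec_analyze_phonetic_mood
  simp only [analyze_phonetic_mood, analyze_phonetic_mood_alt]
  set t := text.toList with ht
  set alpha := (PySem.Chars.lower t).filter (fun c => PySem.Chars.isalpha c) with halpha
  obtain ⟨hlen, hget⟩ := pv_fold_counts t [0, 0, 0, 0, 0] rfl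
  generalize hC : (t.foldl (fun cs c =>
      if PySem.Chars.isalpha (PySem.Chars.lowerChar c) then
        PySem.List.pySetD cs (pvCategory (PySem.Chars.lowerChar c))
          (PySem.List.pyGetD cs (pvCategory (PySem.Chars.lowerChar c)) 0 + 1)
      else cs) ([0, 0, 0, 0, 0] : List Int)) = counts at hlen hget ⊢
  have hslot : ∀ (i : Nat), i < 5 → counts.getD i 0
      = (t.countP (fun c => PySem.Chars.isalpha (PySem.Chars.lowerChar c)
          && pvCategory (PySem.Chars.lowerChar c) == (i : Int)) : Int) := by
    intro i hi
    rw [hget i hi]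
    interval_cases i <;> simp
  clear hC hget
  rcases counts with _ | ⟨a0, _ | ⟨a1, _ | ⟨a2, _ | ⟨a3, _ | ⟨a4, _ | ⟨a5, rest⟩⟩⟩⟩⟩⟩ <;>
    simp only [List.length_nil, List.length_cons] at hlen <;> try omega
  have ha0 : a0 = (alpha.countP (fun c => pvVOWELS.contains c) : Int) := by
    have := hslot 0 (by omega)
    rw [pv_slot_count t ((0 : Nat) : Int) (fun c => pvVOWELS.contains c) (fun c => by simpa using pv_cat_eq_zero c)] at this
    simpa [halpha] using this
  have ha1 : a1 = (alpha.countP (fun c => pvSOFT.contains c) : Int) := by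
    have := hslot 1 (by omega)
    rw [pv_slot_count t ((1 : Nat) : Int) (fun c => pvSOFT.contains c) (fun c => by simpa using pv_cat_eq_one c)] at this
    simpa [halpha] using this
  have ha2 : a2 = (alpha.countP (fun c => pvHARD.contains c) : Int) := by
    have := hslot 2 (by omega)
    rw [pv_slot_count t ((2 : Nat) : Int) (fun c => pvHARD.contains c) (fun c => by simpa using pv_cat_eq_two c)] at this
    simpa [halpha] using this
  have ha3 : a3 = (alpha.countP (fun c => pvSIB.contains c) : Int) := by
    have := hslot 3 (by omega)
    rw [pv_slot_count t ((3 : Nat) : Int) (fun c => pvSIB.contains c) (fun c => by simpa using pv_cat_eq_three c)] at this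
    simpa [halpha] using this
  have ha4 : a4 = (alpha.countP (fun c => pvCategory c == ((4 : Nat) : Int)) : Int) := by
    have := hslot 4 (by omega)
    rw [pv_slot_count t ((4 : Nat) : Int) (fun c => pvCategory c == ((4 : Nat) : Int)) (fun c => rfl)] at this
    simpa [halpha] using this
  have hsum : a0 + a1 + a2 + a3 + a4 = (alpha.length : Int) := by
    rw [ha0, ha1, ha2, ha3, ha4]
    have hp := pv_cat_partition alpha
    have e0 : alpha.countP (fun c => pvCategory c == 0) = alpha.countP (fun c => pvVOWELS.contains c) :=
      List.countP_congr (fun c _ => by rw [pv_cat_eq_zero c])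
    have e1 : alpha.countP (fun c => pvCategory c == 1) = alpha.countP (fun c => pvSOFT.contains c) :=
      List.countP_congr (fun c _ => by rw [pv_cat_eq_one c])
    have e2 : alpha.countP (fun c => pvCategory c == 2) = alpha.countP (fun c => pvHARD.contains c) :=
      List.countP_congr (fun c _ => by rw [pv_cat_eq_two c])
    have e3 : alpha.countP (fun c => pvCategory c == 3) = alpha.countP (fun c => pvSIB.contains c) :=
      List.countP_congr (fun c _ => by rw [pv_cat_eq_three c])
    rw [e0, e1, e2, e3] at hp
    simp only [Nat.cast_ofNat]
    push_cast [← hp]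
    ring
  have hv0 : PySem.List.pyGetD [a0, a1, a2, a3, a4] 0 0 = a0 := by
    rw [PySem.List.pyGetD_zero]
    rfl
  have hsm : ([a0, a1, a2, a3, a4] : List Int).sum = a0 + a1 + a2 + a3 + a4 := by
    simp
    ring
  rw [← ha0, ← ha1, ← ha2, ← ha3, hv0, hsm, ← hsum]
  have hn0 : 0 ≤ a0 := by rw [ha0]; positivity
  have hn1 : 0 ≤ a1 := by rw [ha1]; positivity
  have hn2 : 0 ≤ a2 := by rw [ha2]; positivity
  have hn3 : 0 ≤ a3 := by rw [ha3]; positivity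
  have hn4 : 0 ≤ a4 := by rw [ha4]; positivity
  by_cases hA : alpha = []
  · have hz : a0 + a1 + a2 + a3 + a4 = 0 := by rw [hsum, hA]; rfl
    by_cases hT : t = [] <;> simp [hT, hA, hz]
  · have hT : t ≠ [] := by
      intro h
      apply hA
      rw [halpha, h]
      rfl
    have hlp : 1 ≤ (alpha.length : Int) := by
      have : alpha.length ≠ 0 := by simpa [List.length_eq_zero_iff] using hA
      omega
    have hL : a0 + a1 + a2 + a3 + a4 = (alpha.length : Int) := hsum
    rw [if_neg hT, if_neg hA, if_neg (by omega : ¬ (a0 + a1 + a2 + a3 + a4 = 0))]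
    by_cases hvr : 20 * a0 > 11 * (a0 + a1 + a2 + a3 + a4)
    · rw [if_pos hvr, if_pos hvr]
    · rw [if_neg hvr, if_neg hvr,
        if_neg (by omega : ¬ (a0 + a1 + a2 + a3 + a4 - a0 = 0))]
      obtain ⟨e1, e2⟩ := pv_top_eq a0 a1 a2 a3 a4
      rw [e2, e1]
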